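-- pv_equiv track=rewrite | github.com/DexWilder/algo-lab | research/triage/run_triage.py | estimate_regime_dependence
-- ===== SOURCE A (Python) =====
-- ENTRY_KEYWORDS = {
--     "breakout": ["breakout", "break above", "break below", "crosses above", "crosses below",
--                   "cross above", "cross below", "breaks out", "reclaim"],
--     "mean_reversion": ["mean reversion", "reversion", "oversold", "overbought",
--                         "band touch", "deviation band", "lower band", "dip below"],
--     "pullback": ["pullback", "pull back", "retracement", "retrace", "dip", "pullback hold"],
--     "crossover": ["crossover", "cross over", "ema cross", "ma cross", "vwap cross",
--                    "crosses above", "crosses below"],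
--     "sweep_reversal": ["sweep", "liquidity sweep", "stop hunt", "reversal",
--                         "sweep reversal", "fake breakout"],
--     "fvg": ["fvg", "fair value gap", "imbalance"],
--     "order_block": ["order block", "ob ", "ob,", "demand zone", "supply zone"],
--     "gap": ["gap momentum", "gap", "cumulative gap"],
-- }
--
-- def classify_text(text: str, keyword_map: dict) -> list[str]:
--     """Match text against keyword categories."""
--     text_lower = text.lower()
--     matches = []
--     for category, keywords in keyword_map.items():
--         for kw in keywords:
--             if kw in text_lower:
--                 matches.append(category)
--                 break
--     return matches
--
-- def estimate_regime_dependence(script: dict) -> str: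
--     """Estimate regime dependence."""
--     text = f"{script.get('description', '')} {script.get('notes', '')}".lower()
--
--     entry_types = classify_text(text, ENTRY_KEYWORDS)
--
--     if "mean_reversion" in entry_types:
--         return "range_bound"
--     if "breakout" in entry_types and "mean_reversion" not in entry_types:
--         return "trending"
--     if "sweep_reversal" in entry_types:
--         return "volatile"
--     if any(k in text for k in ["trend follow", "trend-following", "trend template"]):
--         return "trending"
--     if any(k in text for k in ["chop filter", "flat filter", "range filter"]):
--         return "adaptive"
--     return "mixed"
-- ===== SOURCE B (Python) =====
-- ENTRY_KEYWORDS = {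
--     "breakout": ["breakout", "break above", "break below", "crosses above", "crosses below",
--                   "cross above", "cross below", "breaks out", "reclaim"],
--     "mean_reversion": ["mean reversion", "reversion", "oversold", "overbought",
--                         "band touch", "deviation band", "lower band", "dip below"],
--     "pullback": ["pullback", "pull back", "retracement", "retrace", "dip", "pullback hold"],
--     "crossover": ["crossover", "cross over", "ema cross", "ma cross", "vwap cross",
--                    "crosses above", "crosses below"],
--     "sweep_reversal": ["sweep", "liquidity sweep", "stop hunt", "reversal",
--                         "sweep reversal", "fake breakout"],
--     "fvg": ["fvg", "fair value gap", "imbalance"],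
--     "order_block": ["order block", "ob ", "ob,", "demand zone", "supply zone"],
--     "gap": ["gap momentum", "gap", "cumulative gap"],
-- }
--
-- def estimate_regime_dependence(script: dict) -> str:
--     """Estimate regime dependence."""
--     text = f"{script.get('description', '')} {script.get('notes', '')}".lower()
--
--     def has(kws):
--         return any(k in text for k in kws)
--
--     if has(ENTRY_KEYWORDS["mean_reversion"]):
--         return "range_bound"
--     if has(ENTRY_KEYWORDS["breakout"]):
--         return "trending"
--     if has(ENTRY_KEYWORDS["sweep_reversal"]):
--         return "volatile"
--     if has(["trend follow", "trend-following", "trend template"]):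
--         return "trending"
--     if has(["chop filter", "flat filter", "range filter"]):
--         return "adaptive"
--     return "mixed"
-- ===== Notes on version B (the rewrite author's own statement) =====
-- stated objective: simpler
-- what changed: Drops classify_text and the matches list: instead of classifying the text against all eight keyword categories and then testing membership, B lazily tests only the three categories (and two inline lists) that can affect the result, short-circuiting in priority order.
import Mathlib
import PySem

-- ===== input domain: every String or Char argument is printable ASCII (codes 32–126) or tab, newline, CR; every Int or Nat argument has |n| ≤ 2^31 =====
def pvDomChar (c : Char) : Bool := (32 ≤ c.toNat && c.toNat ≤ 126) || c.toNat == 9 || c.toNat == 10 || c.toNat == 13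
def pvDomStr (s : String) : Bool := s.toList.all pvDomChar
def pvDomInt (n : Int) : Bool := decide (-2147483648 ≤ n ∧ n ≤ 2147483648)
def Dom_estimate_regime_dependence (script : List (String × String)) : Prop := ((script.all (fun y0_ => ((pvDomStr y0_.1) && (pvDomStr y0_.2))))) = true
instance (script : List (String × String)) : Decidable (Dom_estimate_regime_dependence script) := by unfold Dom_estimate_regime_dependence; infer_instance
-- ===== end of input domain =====

-- B is simpler: it drops classify_text and the matches list and tests, short-circuiting in
-- the priority order of A's return chain, only the keyword categories that affect the result.

-- ===== PORT A =====
def ENTRY_KEYWORDS : List (String × List String) :=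
  [("breakout", ["breakout", "break above", "break below", "crosses above", "crosses below",
                 "cross above", "cross below", "breaks out", "reclaim"]),
   ("mean_reversion", ["mean reversion", "reversion", "oversold", "overbought",
                       "band touch", "deviation band", "lower band", "dip below"]),
   ("pullback", ["pullback", "pull back", "retracement", "retrace", "dip", "pullback hold"]),
   ("crossover", ["crossover", "cross over", "ema cross", "ma cross", "vwap cross",
                  "crosses above", "crosses below"]),
   ("sweep_reversal", ["sweep", "liquidity sweep", "stop hunt", "reversal",
                       "sweep reversal", "fake breakout"]),
   ("fvg", ["fvg", "fair value gap", "imbalance"]),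
   ("order_block", ["order block", "ob ", "ob,", "demand zone", "supply zone"]),
   ("gap", ["gap momentum", "gap", "cumulative gap"])]

-- the inner 'for kw …: append; break' adds the category iff some keyword matches = List.any
def classify_text (text : String) (keyword_map : List (String × List String)) : List String :=
  let text_lower := PySem.Str.lower text
  keyword_map.foldl
    (fun ms p =>
      if p.2.any (fun kw => PySem.Str.isIn kw text_lower) then ms ++ [p.1] else ms)
    []

def estimate_regime_dependence (script : List (String × String)) : String :=
  let text := PySem.Str.lower
    ((PySem.Dict.mk script).getD "description" "" ++ " " ++ (PySem.Dict.mk script).getD "notes" "")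
  let entry_types := classify_text text ENTRY_KEYWORDS
  if entry_types.contains "mean_reversion" then "range_bound"
  else if entry_types.contains "breakout" && !(entry_types.contains "mean_reversion") then "trending"
  else if entry_types.contains "sweep_reversal" then "volatile"
  else if (["trend follow", "trend-following", "trend template"] : List String).any
            (fun k => PySem.Str.isIn k text) then "trending"
  else if (["chop filter", "flat filter", "range filter"] : List String).any
            (fun k => PySem.Str.isIn k text) then "adaptive"
  else "mixed"

-- ===== PORT B =====
def has_kw (text : String) (kws : List String) : Bool :=
  kws.any (fun k => PySem.Str.isIn k text)

def estimate_regime_dependence_alt (script : List (String × String)) : String :=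
  let text := PySem.Str.lower
    ((PySem.Dict.mk script).getD "description" "" ++ " " ++ (PySem.Dict.mk script).getD "notes" "")
  if has_kw text ((PySem.Dict.mk ENTRY_KEYWORDS).getD "mean_reversion" []) then "range_bound"
  else if has_kw text ((PySem.Dict.mk ENTRY_KEYWORDS).getD "breakout" []) then "trending"
  else if has_kw text ((PySem.Dict.mk ENTRY_KEYWORDS).getD "sweep_reversal" []) then "volatile"
  else if has_kw text ["trend follow", "trend-following", "trend template"] then "trending"
  else if has_kw text ["chop filter", "flat filter", "range filter"] then "adaptive"
  else "mixed"

-- ===== PRECONDITION & SPEC =====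
def Spec_estimate_regime_dependence (script : List (String × String)) (out : String) : Prop := out = estimate_regime_dependence_alt script
instance (script : List (String × String)) (out : String) : Decidable (Spec_estimate_regime_dependence script out) := by unfold Spec_estimate_regime_dependence; infer_instance

-- ===== CLAIM (what is proved, stated in full; the proofs are below) =====
def Claim_equal_estimate_regime_dependence : Prop := ∀ (script : List (String × String)), Dom_estimate_regime_dependence script → Spec_estimate_regime_dependence script (estimate_regime_dependence script)

-- ===== LEMMAS AND PROOFS =====

theorem charLe (a b : Char) : (a ≤ b) ↔ a.toNat ≤ b.toNat := Iff.rfl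

theorem ofNat_toNat_of_lt (n : Nat) (h : n < 55296) : (Char.ofNat n).toNat = n := by
  unfold Char.ofNat
  split
  · simp [Char.toNat, Char.ofNatAux]
  · rename_i hv; exact absurd (Or.inl h) hv

theorem lowerChar_idem (c : Char) :
    PySem.Chars.lowerChar (PySem.Chars.lowerChar c) = PySem.Chars.lowerChar c := by
  unfold PySem.Chars.lowerChar PySem.Chars.isupper
  split_ifs with h1 h2 <;> try rfl
  exfalso
  simp only [Bool.and_eq_true, decide_eq_true_eq, charLe] at h1 h2
  have ha : ('A').toNat = 65 := rfl
  have hz : ('Z').toNat = 90 := rfl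
  rw [ofNat_toNat_of_lt (c.toNat + 32) (by omega)] at h2
  omega

theorem lower_idem (s : String) : PySem.Str.lower (PySem.Str.lower s) = PySem.Str.lower s := by
  apply String.toList_inj.mp
  simp only [PySem.Str.toList_lower, PySem.Chars.lower, List.map_map]
  exact List.map_congr_left (fun c _ => lowerChar_idem c)

theorem contains_classify (t : String) (m : List (String × List String)) (c : String) :
    (classify_text t m).contains c =
      m.any (fun p => p.1 == c && p.2.any (fun kw => PySem.Str.isIn kw (PySem.Str.lower t))) := by
  simp only [classify_text]
  rw [PySem.List.foldl_append_if (fun p => p.2.any (fun kw => PySem.Str.isIn kw (PySem.Str.lower t))) Prod.fst m []]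
  simp only [List.nil_append, List.contains_eq_any_beq, List.any_map, List.any_filter]
  refine List.any_congr rfl (fun p => ?_)
  cases h : p.2.any (fun kw => PySem.Str.isIn kw (PySem.Str.lower t)) <;> simp [Function.comp, BEq.comm]

theorem estimate_regime_dependence_eq_alt (script : List (String × String)) :
    estimate_regime_dependence script = estimate_regime_dependence_alt script := by
  unfold estimate_regime_dependence estimate_regime_dependence_alt
  rw [show (PySem.Dict.mk ENTRY_KEYWORDS).getD "mean_reversion" [] =
        ["mean reversion", "reversion", "oversold", "overbought",
         "band touch", "deviation band", "lower band", "dip below"] from by decide,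
      show (PySem.Dict.mk ENTRY_KEYWORDS).getD "breakout" [] =
        ["breakout", "break above", "break below", "crosses above", "crosses below",
         "cross above", "cross below", "breaks out", "reclaim"] from by decide,
      show (PySem.Dict.mk ENTRY_KEYWORDS).getD "sweep_reversal" [] =
        ["sweep", "liquidity sweep", "stop hunt", "reversal",
         "sweep reversal", "fake breakout"] from by decide]
  simp only [contains_classify, lower_idem, has_kw, ENTRY_KEYWORDS, List.any_cons, List.any_nil]
  simp
  split_ifs <;> simp_all

-- ===== VERDICT (by name: the statement is the Claim_ definition above) =====
theorem estimate_regime_dependence_spec : Claim_equal_estimate_regime_dependence := by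
  intro script _
  unfold Spec_estimate_regime_dependence
  exact estimate_regime_dependence_eq_alt script
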